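-- pv_equiv track=rewrite | github.com/edchengg/easyproject | ner/decode_marker_conll.py | extract_marker_entity
-- ===== SOURCE A (Python) =====
-- def extract_marker_entity(sentence, marker_tags):
--     entity_list = []
--     for tag in marker_tags:
--         sentence = sentence.replace(tag, ' {} '.format(tag))
--     toks = sentence.split()
--     start_marker_tag = '['
--     end_tag = ']'
--     start = None
--     for idx, tok in enumerate(toks):
--         if tok == start_marker_tag:
--             start = idx
--         elif tok == end_tag and start != None:
--
--             entity = toks[start + 1: idx]
--
--             entity_list.append(entity)
--             start = None
--         else:
--             pass
--     return entity_list
-- ===== SOURCE B (Python) =====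
-- def _split_on(toks, delim):
--     # pieces strictly between delimiter tokens; the tail after the last delimiter is dropped
--     chunks = []
--     cur = []
--     for t in toks:
--         if t == delim:
--             chunks.append(cur)
--             cur = []
--         else:
--             cur.append(t)
--     return chunks
--
-- def _after_last(seg, mark):
--     # tokens after the last occurrence of mark
--     tail = []
--     for t in seg:
--         if t == mark:
--             tail = []
--         else:
--             tail.append(t)
--     return tail
--
-- def extract_marker_entity(sentence, marker_tags):
--     for tag in marker_tags:
--         sentence = sentence.replace(tag, ' {} '.format(tag))
--     toks = sentence.split()
--     return [_after_last(seg, '[') for seg in _split_on(toks, ']') if '[' in seg]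
-- ===== Notes on version B (the rewrite author's own statement) =====
-- stated objective: alternative
-- what changed: Replaced A's single stateful scan with start-index bookkeeping and toks[start+1:idx] slicing by a staged pipeline: split the token list on ']' into segments, then for each segment containing '[' emit the tokens after its last '[' (last-open-wins).
import Mathlib
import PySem

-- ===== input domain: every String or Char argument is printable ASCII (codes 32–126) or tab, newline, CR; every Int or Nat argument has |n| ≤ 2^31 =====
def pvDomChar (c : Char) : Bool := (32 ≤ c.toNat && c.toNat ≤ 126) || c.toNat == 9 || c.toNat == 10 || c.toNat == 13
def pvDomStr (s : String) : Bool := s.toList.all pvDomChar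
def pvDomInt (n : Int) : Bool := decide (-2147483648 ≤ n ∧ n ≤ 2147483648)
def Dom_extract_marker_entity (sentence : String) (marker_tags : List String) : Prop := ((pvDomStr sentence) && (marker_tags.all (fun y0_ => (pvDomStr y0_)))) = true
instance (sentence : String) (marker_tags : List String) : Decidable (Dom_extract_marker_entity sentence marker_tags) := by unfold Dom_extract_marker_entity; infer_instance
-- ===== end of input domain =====

-- B replaces A's single stateful scan (start index + toks[start+1:idx] slicing) by a staged
-- pipeline: split the tokens on ']' into segments, then emit, for each segment containing '[',
-- the tokens after its last '[' (objective: alternative decomposition, same cost).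

-- ===== PORT A =====
-- one step of A's loop body over (entity_list, start), fed pairs from enumerate(toks)
def stepA (toks : List String) (st : List (List String) × Option Int) (p : Int × String) :
    List (List String) × Option Int :=
  if p.2 = "[" then (st.1, some p.1)
  else if p.2 = "]" then
    match st.2 with
    | some s => (st.1 ++ [PySem.List.slice toks (some (s + 1)) (some p.1)], none)
    | none => st
  else st

def extract_marker_entity (sentence : String) (marker_tags : List String) : List (List String) :=
  let sentence := marker_tags.foldl (fun s tag => PySem.Str.replace s tag (" " ++ tag ++ " ")) sentence
  let toks := PySem.Str.split₀ sentence
  ((PySem.List.enumerate toks 0).foldl (stepA toks) ([], none)).1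

-- ===== PORT B =====
-- _split_on: pieces strictly between delimiter tokens; the tail after the last delimiter is dropped
def pvSplitOn (toks : List String) (delim : String) : List (List String) :=
  (toks.foldl
    (fun st t => if t = delim then (st.1 ++ [st.2], ([] : List String)) else (st.1, st.2 ++ [t]))
    ([], [])).1

-- _after_last: tokens after the last occurrence of mark
def pvAfterLast (seg : List String) (mark : String) : List String :=
  seg.foldl (fun tail t => if t = mark then [] else tail ++ [t]) []

def extract_marker_entity_alt (sentence : String) (marker_tags : List String) : List (List String) :=
  let sentence := marker_tags.foldl (fun s tag => PySem.Str.replace s tag (" " ++ tag ++ " ")) sentence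
  let toks := PySem.Str.split₀ sentence
  ((pvSplitOn toks "]").filter (fun seg => "[" ∈ seg)).map (fun seg => pvAfterLast seg "[")

-- ===== PRECONDITION & SPEC =====
def Spec_extract_marker_entity (sentence : String) (marker_tags : List String) (out : List (List String)) : Prop := out = extract_marker_entity_alt sentence marker_tags
instance (sentence : String) (marker_tags : List String) (out : List (List String)) : Decidable (Spec_extract_marker_entity sentence marker_tags out) := by unfold Spec_extract_marker_entity; infer_instance

-- ===== CLAIM (what is proved, stated in full; the proofs are below) =====
def Claim_equal_extract_marker_entity : Prop := ∀ (sentence : String) (marker_tags : List String), Dom_extract_marker_entity sentence marker_tags → Spec_extract_marker_entity sentence marker_tags (extract_marker_entity sentence marker_tags)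

-- ===== LEMMAS AND PROOFS =====

-- proof-side intermediate: a buffer-accumulator step (neither port uses it)
def stepM (st : List (List String) × Option (List String)) (tok : String) :
    List (List String) × Option (List String) :=
  if tok = "[" then (st.1, some [])
  else if tok = "]" then
    match st.2 with
    | some cur => (st.1 ++ [cur], none)
    | none => st
  else
    match st.2 with
    | some cur => (st.1, some (cur ++ [tok]))
    | none => st

-- invariant relating A's open-bracket index to the buffer after k tokens
def PVRel (toks : List String) (k : Nat) : Option Int → Option (List String) → Prop
  | none, none => True
  | some s, some buf =>
      s = (s.toNat : Int) ∧ s.toNat + 1 ≤ k ∧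
        buf = (toks.drop (s.toNat + 1)).take (k - (s.toNat + 1))
  | _, _ => False

lemma loopA_eq_M (toks : List String) :
    ∀ (rest : List String) (k : Nat), toks.drop k = rest →
    ∀ (acc : List (List String)) (stA : Option Int) (stB : Option (List String)),
      PVRel toks k stA stB →
      ((PySem.List.enumerate rest (k : Int)).foldl (stepA toks) (acc, stA)).1
        = (rest.foldl stepM (acc, stB)).1 := by
  intro rest
  induction rest with
  | nil => intro k _ acc stA stB _; simp [PySem.List.enumerate]
  | cons t rest ih =>
    intro k hk acc stA stB hrel
    have hklen : k < toks.length := by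
      by_contra h
      rw [List.drop_eq_nil_of_le (by omega)] at hk
      simp at hk
    have ht : toks[k] = t := by
      have := List.drop_eq_getElem_cons hklen
      rw [hk] at this
      exact (List.cons.injEq _ _ _ _ ▸ this).1.symm
    have hdrop : toks.drop (k + 1) = rest := by
      have := List.drop_eq_getElem_cons hklen
      rw [hk] at this
      exact (List.cons.injEq _ _ _ _ ▸ this).2.symm
    rw [PySem.List.enumerate_cons, List.foldl_cons, List.foldl_cons]
    by_cases h1 : t = "["
    · have := ih (k + 1) hdrop acc (some (k : Int)) (some [])
        ⟨by simp, by omega, by simp⟩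
      simpa [stepA, stepM, h1, Int.natCast_add, Int.natCast_one] using this
    · by_cases h2 : t = "]"
      · cases stA with
        | none =>
          cases stB with
          | none =>
            have := ih (k + 1) hdrop acc none none trivial
            simpa [stepA, stepM, h1, h2, Int.natCast_add, Int.natCast_one] using this
          | some b => exact ((hrel : False)).elim
        | some s =>
          cases stB with
          | none => exact ((hrel : False)).elim
          | some buf =>
            obtain ⟨hs, hsk, hbuf⟩ := hrel
            have hslice : PySem.List.slice toks (some (s + 1)) (some (k : Int)) = buf := by
              rw [hs]
              have : (s.toNat : Int) + 1 = ((s.toNat + 1 : Nat) : Int) := by push_cast; ring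
              rw [this, PySem.List.slice_natCast, hbuf]
            have := ih (k + 1) hdrop (acc ++ [buf]) none none trivial
            simpa [stepA, stepM, h1, h2, hslice, Int.natCast_add, Int.natCast_one] using this
      · cases stA with
        | none =>
          cases stB with
          | none =>
            have := ih (k + 1) hdrop acc none none trivial
            simpa [stepA, stepM, h1, h2, Int.natCast_add, Int.natCast_one] using this
          | some b => exact ((hrel : False)).elim
        | some s =>
          cases stB with
          | none => exact ((hrel : False)).elim
          | some buf =>
            obtain ⟨hs, hsk, hbuf⟩ := hrel
            have hnext : buf ++ [t] =
                (toks.drop (s.toNat + 1)).take (k + 1 - (s.toNat + 1)) := by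
              have hj : k + 1 - (s.toNat + 1) = (k - (s.toNat + 1)) + 1 := by omega
              rw [hj, List.take_add_one, hbuf]
              have hget : (toks.drop (s.toNat + 1))[k - (s.toNat + 1)]? = some t := by
                rw [List.getElem?_drop]
                have : s.toNat + 1 + (k - (s.toNat + 1)) = k := by omega
                rw [this, List.getElem?_eq_getElem hklen, ht]
              rw [hget]
              rfl
            have := ih (k + 1) hdrop acc (some s) (some (buf ++ [t]))
              ⟨hs, by omega, hnext⟩
            simpa [stepA, stepM, h1, h2, Int.natCast_add, Int.natCast_one] using this

-- the buffer corresponding to a partial segment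
def bufOf (cur : List String) : Option (List String) :=
  if "[" ∈ cur then some (pvAfterLast cur "[") else none

-- pvAfterLast on a snoc
lemma afterLast_snoc (cur : List String) (t mark : String) :
    pvAfterLast (cur ++ [t]) mark =
      if t = mark then [] else pvAfterLast cur mark ++ [t] := by
  simp [pvAfterLast, List.foldl_append]

-- the split fold's chunks are a prefix-accumulator
def stepS (st : List (List String) × List String) (t : String) :
    List (List String) × List String :=
  if t = "]" then (st.1 ++ [st.2], []) else (st.1, st.2 ++ [t])

lemma stepS_chunks (rest : List String) :
    ∀ (chunks : List (List String)) (cur : List String),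
      rest.foldl stepS (chunks, cur)
        = (chunks ++ (rest.foldl stepS ([], cur)).1, (rest.foldl stepS ([], cur)).2) := by
  induction rest with
  | nil => intro chunks cur; simp
  | cons t rest ih =>
    intro chunks cur
    by_cases h : t = "]"
    · simp only [List.foldl_cons, stepS, h, reduceIte, List.nil_append]
      rw [ih (chunks ++ [cur]), ih [cur]]
      simp
    · simp only [List.foldl_cons, stepS, if_neg h]
      exact ih chunks (cur ++ [t])

-- post-processing of the chunk list
def postS (chunks : List (List String)) : List (List String) :=
  (chunks.filter (fun seg => "[" ∈ seg)).map (fun seg => pvAfterLast seg "[")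

lemma postS_append (a b : List (List String)) : postS (a ++ b) = postS a ++ postS b := by
  simp [postS]

lemma loopM_eq_S (toks : List String) :
    ∀ (acc : List (List String)) (cur : List String),
      (toks.foldl stepM (acc, bufOf cur)).1
        = acc ++ postS ((toks.foldl stepS ([], cur)).1) := by
  induction toks with
  | nil => intro acc cur; simp [postS]
  | cons t rest ih =>
    intro acc cur
    by_cases h1 : t = "["
    · have hb : bufOf (cur ++ ["["]) = some [] := by
        simp [bufOf, afterLast_snoc]
      have hM : stepM (acc, bufOf cur) t = (acc, bufOf (cur ++ [t])) := by
        simp [stepM, h1, hb]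
      simp only [List.foldl_cons, hM, stepS, if_neg (by simp [h1] : ¬ t = "]")]
      exact ih acc (cur ++ [t])
    · by_cases h2 : t = "]"
      · have hM : stepM (acc, bufOf cur) t =
            (acc ++ postS [cur], bufOf []) := by
          by_cases hm : "[" ∈ cur
          · simp [stepM, h1, h2, bufOf, hm, postS]
          · simp [stepM, h1, h2, bufOf, hm, postS]
        simp only [List.foldl_cons, hM, stepS, if_pos h2, List.nil_append]
        rw [ih (acc ++ postS [cur]) [], stepS_chunks rest [cur]]
        simp [← postS_append, List.append_assoc]
      · have h1' : ¬ ("[" = t) := fun h => h1 h.symm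
        have hM : stepM (acc, bufOf cur) t = (acc, bufOf (cur ++ [t])) := by
          by_cases hm : "[" ∈ cur
          · simp [stepM, h1, h2, bufOf, hm, afterLast_snoc, h1']
          · simp [stepM, h1, h2, bufOf, hm, afterLast_snoc, h1']
        simp only [List.foldl_cons, hM, stepS, if_neg h2]
        exact ih acc (cur ++ [t])

-- ===== VERDICT (by name: the statement is the Claim_ definition above) =====
theorem extract_marker_entity_spec : Claim_equal_extract_marker_entity := by
  intro sentence marker_tags _
  unfold Spec_extract_marker_entity extract_marker_entity extract_marker_entity_alt
  set toks := PySem.Str.split₀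
    (marker_tags.foldl (fun s tag => PySem.Str.replace s tag (" " ++ tag ++ " ")) sentence) with htoks
  have h1 := loopA_eq_M toks toks 0 (by simp) [] none (bufOf [])
    (by simp [bufOf, PVRel])
  have h2 := loopM_eq_S toks [] []
  have hS : pvSplitOn toks "]" = (toks.foldl stepS ([], [])).1 := rfl
  simp only [htoks, Nat.cast_zero] at *
  rw [h1, h2, hS]
  simp [postS]
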